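-- pv_equiv track=rewrite | github.com/jaaabir/baymax | server_api/automate_queries.py | merge_corpus
-- ===== SOURCE A (Python) =====
-- def merge_corpus(corpus, text):
--     new_corpus = []
--     split_by = '\n'
--
--     for lines in corpus[:-1].split(split_by):
--         new_corpus.append(lines)
--
--     for lines in text.split(split_by):
--         new_corpus.append(lines)
--
--     new_corpus.append(corpus[-1])
--
--     return '\n'.join(new_corpus)
-- ===== SOURCE B (Python) =====
-- def merge_corpus(corpus, text):
--     return corpus[:-1] + '\n' + text + '\n' + corpus[-1]
-- ===== Notes on version B (the rewrite author's own statement) =====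
-- stated objective: simpler
-- what changed: Replaces the two split loops, list accumulation and '\n'.join with one closed-form concatenation corpus[:-1] + '\n' + text + '\n' + corpus[-1], using that joining a split by the same separator reconstructs the string.
import Mathlib
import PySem

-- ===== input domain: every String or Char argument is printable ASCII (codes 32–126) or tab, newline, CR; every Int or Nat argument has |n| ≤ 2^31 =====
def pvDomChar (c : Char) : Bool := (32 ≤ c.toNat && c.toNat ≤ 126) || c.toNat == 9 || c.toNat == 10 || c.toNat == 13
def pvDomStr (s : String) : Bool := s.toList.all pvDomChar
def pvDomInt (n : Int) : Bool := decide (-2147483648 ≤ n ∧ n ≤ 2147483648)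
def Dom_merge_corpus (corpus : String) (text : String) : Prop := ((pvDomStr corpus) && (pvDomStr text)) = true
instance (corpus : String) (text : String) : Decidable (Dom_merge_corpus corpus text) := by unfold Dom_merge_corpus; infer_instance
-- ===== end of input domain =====

-- B replaces the split/append/join loops of A with one closed-form concatenation (objective: simpler).

-- ===== PORT A =====
-- literal transliteration: split corpus[:-1] and text on '\n' (sep is non-empty, so
-- Python's split is exact as PySem.Chars.splitOn), append each line with a fold,
-- append corpus[-1] (IndexError when corpus = "", excluded by Pre_), then '\n'.join.
def merge_corpus (corpus : String) (text : String) : String :=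
  let split_by : List Char := ['\n']
  let new1 : List (List Char) :=
    (PySem.Chars.splitOn (PySem.Str.slice corpus none (some (-1))).toList split_by).foldl
      (fun acc lines => acc ++ [lines]) []
  let new2 : List (List Char) :=
    (PySem.Chars.splitOn text.toList split_by).foldl (fun acc lines => acc ++ [lines]) new1
  let last : List Char := match PySem.Str.pyGet? corpus (-1) with
    | some ch => [ch]
    | none => []   -- Python raises IndexError here; excluded by Pre_merge_corpus
  String.ofList (PySem.Chars.join ['\n'] (new2 ++ [last]))

-- ===== PORT B =====
-- literal transliteration of Source B: corpus[:-1] + '\n' + text + '\n' + corpus[-1]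
def merge_corpus_alt (corpus : String) (text : String) : String :=
  let last : List Char := match PySem.Str.pyGet? corpus (-1) with
    | some ch => [ch]
    | none => []   -- Python raises IndexError here; excluded by Pre_merge_corpus
  String.ofList ((PySem.Str.slice corpus none (some (-1))).toList ++ '\n' :: (text.toList ++ '\n' :: last))

-- ===== PRECONDITION & SPEC =====
-- Pre_ excludes only corpus = "", on which Python A raises IndexError at corpus[-1] (B raises there too).
def Pre_merge_corpus (corpus : String) (text : String) : Prop := corpus ≠ ""
instance (corpus : String) (text : String) : Decidable (Pre_merge_corpus corpus text) := by unfold Pre_merge_corpus; infer_instance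
def pvWitness_merge_corpus : String × String := ("a\nbc", "x\ny")

def Spec_merge_corpus (corpus : String) (text : String) (out : String) : Prop := out = merge_corpus_alt corpus text
instance (corpus : String) (text : String) (out : String) : Decidable (Spec_merge_corpus corpus text out) := by unfold Spec_merge_corpus; infer_instance

-- ===== CLAIM (what is proved, stated in full; the proofs are below) =====
def Claim_equal_merge_corpus : Prop := ∀ (corpus : String) (text : String), Dom_merge_corpus corpus text → Pre_merge_corpus corpus text → Spec_merge_corpus corpus text (merge_corpus corpus text)

-- ===== LEMMAS AND PROOFS =====

-- append-in-a-loop is init ++ list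
theorem pv_foldl_snoc {α : Type} (l : List α) (init : List α) :
    l.foldl (fun acc x => acc ++ [x]) init = init ++ l := by
  induction l generalizing init with
  | nil => simp
  | cons x xs ih => simp [List.foldl, ih]

-- the fuel-based PySem splitter agrees with Mathlib's List.splitOn
theorem pv_splitOn_go (c : Char) (fuel : Nat) (l cur : List Char) (acc : List (List Char))
    (h : l.length ≤ fuel) :
    PySem.Chars.splitOn.go [c] fuel l cur acc
      = acc.reverse ++ (List.splitOn c l).modifyHead (cur.reverse ++ ·) := by
  induction fuel generalizing l cur acc with
  | zero =>
    have : l = [] := by simpa using List.eq_nil_of_length_eq_zero (Nat.le_zero.mp h)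
    subst this
    simp [PySem.Chars.splitOn.go]
  | succ n ih =>
    cases l with
    | nil => simp [PySem.Chars.splitOn.go]
    | cons d rest =>
      by_cases hd : d = c
      · subst hd
        have hpre : List.isPrefixOf [d] (d :: rest) = true := by simp [List.isPrefixOf]
        simp only [PySem.Chars.splitOn.go, hpre, if_pos]
        rw [show List.drop (List.length [d]) (d :: rest) = rest by simp]
        rw [ih rest [] ((cur.reverse) :: acc) (by simpa using Nat.le_of_succ_le_succ h)]
        simp [List.splitOn, List.splitOnP_cons]
        cases List.splitOnP (fun x => x == d) rest <;> simp
      · have hpre : List.isPrefixOf [c] (d :: rest) = false := by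
          simp [List.isPrefixOf]; exact fun hcd => absurd hcd.symm hd
        simp only [PySem.Chars.splitOn.go, hpre]
        rw [if_neg (by simp)]
        rw [ih rest (d :: cur) acc (by simpa using Nat.le_of_succ_le_succ h)]
        have : (d :: rest).splitOn c = ((rest.splitOn c).modifyHead (d :: ·)) := by
          simp [List.splitOn, List.splitOnP_cons, hd]
        rw [this]
        cases hsp : rest.splitOn c with
        | nil => simp
        | cons p ps => simp

theorem pv_splitOn (c : Char) (s : List Char) :
    PySem.Chars.splitOn s [c] = List.splitOn c s := by
  unfold PySem.Chars.splitOn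
  rw [pv_splitOn_go c (s.length + 1) s [] [] (by omega)]
  cases hsp : s.splitOn c with
  | nil => simp
  | cons p ps => simp

theorem pv_splitOn_ne_nil (c : Char) (s : List Char) : List.splitOn c s ≠ [] :=
  List.splitOnP_ne_nil _ s

theorem pv_join_cons (c : Char) (x : List Char) (ys : List (List Char)) (h : ys ≠ []) :
    PySem.Chars.join [c] (x :: ys) = x ++ c :: PySem.Chars.join [c] ys := by
  obtain ⟨y, ys, rfl⟩ := List.exists_cons_of_ne_nil h
  simp [PySem.Chars.join, List.intercalate]

theorem pv_join_append (c : Char) (xs ys : List (List Char)) (hy : ys ≠ []) (hx : xs ≠ []) :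
    PySem.Chars.join [c] (xs ++ ys) = PySem.Chars.join [c] xs ++ c :: PySem.Chars.join [c] ys := by
  induction xs with
  | nil => exact absurd rfl hx
  | cons x xs ih =>
    cases xs with
    | nil => simpa [PySem.Chars.join, List.intercalate] using pv_join_cons c x ys hy
    | cons x' xs' =>
      rw [List.cons_append, pv_join_cons c x (x' :: xs' ++ ys) (by simp),
          pv_join_cons c x (x' :: xs') (by simp), ih (by simp)]
      simp

-- join-of-splitOn reconstructs the string
theorem pv_join_splitOn (c : Char) (s : List Char) :
    PySem.Chars.join [c] (List.splitOn c s) = s := by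
  simpa [PySem.Chars.join] using List.intercalate_splitOn s c

-- ===== VERDICT (by name: the statement is the Claim_ definition above) =====
theorem merge_corpus_spec : Claim_equal_merge_corpus := by
  intro corpus text _ _
  unfold Spec_merge_corpus merge_corpus merge_corpus_alt
  simp only [pv_foldl_snoc, pv_splitOn, List.nil_append]
  rw [List.append_assoc,
      pv_join_append '\n' _ _ (by simp) (pv_splitOn_ne_nil _ _),
      pv_join_append '\n' _ _ (by simp) (pv_splitOn_ne_nil _ _),
      pv_join_splitOn, pv_join_splitOn]
  simp [PySem.Chars.join, List.intercalate]
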